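-- pv_equiv track=rewrite | github.com/uniwue-it4all/it4all-resources | programming/5-tuples_and_dicts/2-dicts/unit_test_sols/dicts_1.py | word_position_list
-- ===== SOURCE A (Python) =====
-- from typing import Dict, List
--
-- def word_position_list(my_str: str) -> Dict[str, List[int]]:
--     result: Dict[str, List[int]] = {}
--
--     for index, word in enumerate(my_str.split(' ')):
--         if word in result:
--             result[word].append(index)
--         else:
--             result[word] = [index]
--
--     return result
-- ===== SOURCE B (Python) =====
-- def word_position_list(my_str):
--     words = my_str.split(' ')
--     return {w: [i for i, x in enumerate(words) if x == w] for w in dict.fromkeys(words)}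
-- ===== Notes on version B (the rewrite author's own statement) =====
-- stated objective: alternative
-- what changed: Replaced A's single accumulating dict-update pass with a group-by: compute the ordered distinct words once (dict.fromkeys) and build each entry by a fresh positional scan of the enumerated word list.
import Mathlib
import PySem

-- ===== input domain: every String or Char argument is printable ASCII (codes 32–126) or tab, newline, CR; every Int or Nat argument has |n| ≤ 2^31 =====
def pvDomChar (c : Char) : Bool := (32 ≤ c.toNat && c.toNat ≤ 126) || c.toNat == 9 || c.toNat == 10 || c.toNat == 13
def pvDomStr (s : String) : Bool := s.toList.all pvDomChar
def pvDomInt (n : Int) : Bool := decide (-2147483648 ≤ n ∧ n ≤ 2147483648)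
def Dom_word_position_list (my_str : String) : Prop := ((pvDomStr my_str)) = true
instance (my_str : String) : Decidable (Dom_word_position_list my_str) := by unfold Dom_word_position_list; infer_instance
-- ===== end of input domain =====

-- B replaces A's single accumulating dict pass with a group-by over the ordered distinct
-- words, each entry built by a fresh scan of the enumerated word list (alternative, not faster).

-- ===== PORT A =====
def word_position_list (my_str : String) : List (String × List Int) :=
  ((PySem.List.enumerate ((PySem.Chars.splitOn my_str.toList [' ']).map String.ofList)).foldl
    (fun (result : PySem.Dict String (List Int)) (p : Int × String) =>
      if result.contains p.2 then
        PySem.Dict.modify result p.2 [] (fun l => l ++ [p.1])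
      else
        result.insert p.2 [p.1])
    PySem.Dict.empty).items

-- ===== PORT B =====
-- [i for i, x in enumerate(words) if x == w]
def pvPositions (words : List String) (w : String) : List Int :=
  ((PySem.List.enumerate words).filter (fun p => p.2 == w)).map (fun p => p.1)

def word_position_list_alt (my_str : String) : List (String × List Int) :=
  let words := (PySem.Chars.splitOn my_str.toList [' ']).map String.ofList
  (PySem.List.dedup words).map (fun w => (w, pvPositions words w))

-- ===== PRECONDITION & SPEC =====
def Spec_word_position_list (my_str : String) (out : List (String × List Int)) : Prop := out = word_position_list_alt my_str
instance (my_str : String) (out : List (String × List Int)) : Decidable (Spec_word_position_list my_str out) := by unfold Spec_word_position_list; infer_instance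

-- ===== CLAIM (what is proved, stated in full; the proofs are below) =====
def Claim_equal_word_position_list : Prop := ∀ (my_str : String), Dom_word_position_list my_str → Spec_word_position_list my_str (word_position_list my_str)

-- ===== LEMMAS AND PROOFS =====

-- positions of w in ws, counting from start index s (pvPositions ws w = pvPosF w ws 0)
def pvPosF (w : String) (ws : List String) (s : Int) : List Int :=
  ((PySem.List.enumerate ws s).filter (fun p => p.2 == w)).map (fun p => p.1)

theorem pvPosF_cons (w x : String) (xs : List String) (s : Int) :
    pvPosF w (x :: xs) s = (if x = w then [s] else []) ++ pvPosF w xs (s + 1) := by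
  simp only [pvPosF, PySem.List.enumerate_cons, List.filter_cons]
  by_cases h : x = w <;> simp [h]

theorem pvPosF_cons_ne (w x : String) (xs : List String) (s : Int) (h : x ≠ w) :
    pvPosF w (x :: xs) s = pvPosF w xs (s + 1) := by
  rw [pvPosF_cons]; simp [h]

-- the first occurrences, in order, of words of ws whose key is not already in K
def pvNewKeys (K : List String) : List String → List String
  | [] => []
  | x :: xs => if K.contains x then pvNewKeys K xs else x :: pvNewKeys (K ++ [x]) xs

theorem mem_pvNewKeys (w : String) : ∀ (ws K : List String), w ∈ pvNewKeys K ws → w ∉ K := by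
  intro ws
  induction ws with
  | nil => intro K h; simp [pvNewKeys] at h
  | cons x xs ih =>
    intro K h
    by_cases hx : K.contains x
    · rw [pvNewKeys, if_pos hx] at h; exact ih K h
    · rw [pvNewKeys, if_neg hx] at h
      rcases List.mem_cons.mp h with h1 | h2
      · subst h1; intro hw; exact hx (List.contains_iff_mem.mpr hw)
      · intro hw; exact ih (K ++ [x]) h2 (List.mem_append_left _ hw)

theorem pvSet_foldl_add : ∀ (ws K : List String),
    List.foldl PySem.Set.add K ws = K ++ pvNewKeys K ws := by
  intro ws
  induction ws with
  | nil => intro K; simp [pvNewKeys]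
  | cons x xs ih =>
    intro K
    rw [List.foldl_cons, pvNewKeys]
    by_cases hx : K.contains x
    · rw [if_pos hx]
      have hm : x ∈ K := List.contains_iff_mem.mp hx
      have : PySem.Set.add K x = K := by simp [PySem.Set.add, hm]
      rw [this, ih K]
    · rw [if_neg hx]
      have hm : x ∉ K := fun h => hx (List.contains_iff_mem.mpr h)
      have : PySem.Set.add K x = K ++ [x] := by simp [PySem.Set.add, hm]
      rw [this, ih (K ++ [x])]
      simp

theorem pvDict_contains_iff (d : PySem.Dict String (List Int)) (k : String) :
    d.contains k = true ↔ k ∈ d.items.map Prod.fst := by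
  simp [PySem.Dict.contains, List.any_eq_true, List.mem_map, beq_iff_eq]

theorem pvFind_eq (l : List (String × List Int)) (k : String) (v : List Int)
    (hnd : (l.map Prod.fst).Nodup) (hm : (k, v) ∈ l) :
    l.find? (fun p => p.1 == k) = some (k, v) := by
  induction l with
  | nil => cases hm
  | cons p l ih =>
    simp only [List.map_cons, List.nodup_cons] at hnd
    rcases List.mem_cons.mp hm with h1 | h2
    · rw [← h1, List.find?_cons_of_pos (by simp)]
    · have hne : (p.1 == k) = false := by
        simp only [beq_eq_false_iff_ne, ne_eq]
        intro he
        exact hnd.1 (he ▸ List.mem_map.mpr ⟨(k, v), h2, rfl⟩)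
      rw [List.find?_cons_of_neg (by simp [hne])]
      exact ih hnd.2 h2

theorem pvGetD_eq (d : PySem.Dict String (List Int)) (k : String) (v : List Int)
    (hnd : (d.items.map Prod.fst).Nodup) (hm : (k, v) ∈ d.items) :
    d.getD k [] = v := by
  simp [PySem.Dict.getD, PySem.Dict.get?, pvFind_eq d.items k v hnd hm]

theorem pvFoldA (ws : List String) : ∀ (s : Int) (d : PySem.Dict String (List Int)),
    (d.items.map Prod.fst).Nodup →
    ((PySem.List.enumerate ws s).foldl
      (fun (result : PySem.Dict String (List Int)) (p : Int × String) =>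
        if result.contains p.2 then
          PySem.Dict.modify result p.2 [] (fun l => l ++ [p.1])
        else
          result.insert p.2 [p.1]) d).items
    = d.items.map (fun kv => (kv.1, kv.2 ++ pvPosF kv.1 ws s))
      ++ (pvNewKeys (d.items.map Prod.fst) ws).map (fun w => (w, pvPosF w ws s)) := by
  induction ws with
  | nil =>
    intro s d hnd
    simp [PySem.List.enumerate, pvPosF, pvNewKeys]
  | cons x xs ih =>
    intro s d hnd
    rw [PySem.List.enumerate_cons, List.foldl_cons]
    by_cases hx : d.contains x
    · -- existing key: overwrite in place
      simp only [hx, if_true]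
      have hitems : (PySem.Dict.modify d x [] (fun l => l ++ [s])).items
          = d.items.map (fun p => if p.1 == x then (x, d.getD x [] ++ [s]) else p) := by
        simp [PySem.Dict.modify, PySem.Dict.insert, hx]
      have hkeys : ((PySem.Dict.modify d x [] (fun l => l ++ [s])).items.map Prod.fst)
          = d.items.map Prod.fst := by
        rw [hitems, List.map_map]
        apply List.map_congr_left
        intro p _
        by_cases hp : p.1 == x
        · simp [(beq_iff_eq.mp hp).symm]
        · have : p.1 ≠ x := by simpa using hp
          simp [this]
      rw [ih (s + 1) _ (hkeys ▸ hnd)]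
      rw [hkeys, hitems, List.map_map]
      have hxmem : x ∈ d.items.map Prod.fst := (pvDict_contains_iff d x).mp hx
      congr 1
      · apply List.map_congr_left
        intro kv hkv
        by_cases hp : kv.1 == x
        · have hk : kv.1 = x := beq_iff_eq.mp hp
          have hget : d.getD x [] = kv.2 := pvGetD_eq d x kv.2 hnd (hk ▸ hkv)
          simp only [Function.comp_apply, if_pos, hget, hk, pvPosF_cons]
          simp
        · have hk : kv.1 ≠ x := by simpa using hp
          simp only [Function.comp_apply, hp, Bool.false_eq_true, if_false]
          rw [pvPosF_cons_ne _ _ _ _ (Ne.symm hk)]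
      · rw [pvNewKeys, if_pos (List.contains_iff_mem.mpr hxmem)]
        apply List.map_congr_left
        intro w hw
        have hwK := mem_pvNewKeys w xs _ hw
        have hwx : x ≠ w := fun he => hwK (he ▸ hxmem)
        rw [pvPosF_cons_ne _ _ _ _ hwx]
    · -- new key: append at the end
      simp only [hx, Bool.false_eq_true, if_false]
      have hitems : (d.insert x [s]).items = d.items ++ [(x, [s])] := by
        simp [PySem.Dict.insert, hx]
      have hxnm : x ∉ d.items.map Prod.fst := fun h => hx ((pvDict_contains_iff d x).mpr h)
      have hkeys : ((d.insert x [s]).items.map Prod.fst) = d.items.map Prod.fst ++ [x] := by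
        rw [hitems]; simp
      have hnd' : (((d.insert x [s]).items.map Prod.fst)).Nodup := by
        rw [hkeys]
        refine List.Nodup.append hnd (List.nodup_singleton x) ?_
        intro a ha hb
        rcases List.mem_singleton.mp hb with rfl
        exact hxnm ha
      rw [ih (s + 1) _ hnd', hkeys, hitems]
      rw [pvNewKeys, if_neg (fun h => hxnm (List.contains_iff_mem.mp h))]
      rw [List.map_append, List.map_cons]
      have e1 : (d.items.map (fun kv => (kv.1, kv.2 ++ pvPosF kv.1 xs (s + 1))))
          = d.items.map (fun kv => (kv.1, kv.2 ++ pvPosF kv.1 (x :: xs) s)) := by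
        apply List.map_congr_left
        intro kv hkv
        have hk : x ≠ kv.1 := by
          intro he
          exact hxnm (List.mem_map.mpr ⟨kv, hkv, he.symm⟩)
        rw [pvPosF_cons_ne _ _ _ _ hk]
      have e2 : pvPosF x (x :: xs) s = [s] ++ pvPosF x xs (s + 1) := by
        rw [pvPosF_cons, if_pos rfl]
      have e3 : ((pvNewKeys (d.items.map Prod.fst ++ [x]) xs).map (fun w => (w, pvPosF w xs (s + 1))))
          = (pvNewKeys (d.items.map Prod.fst ++ [x]) xs).map (fun w => (w, pvPosF w (x :: xs) s)) := by
        apply List.map_congr_left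
        intro w hw
        have hwK := mem_pvNewKeys w xs _ hw
        have hwx : x ≠ w := fun he => hwK (List.mem_append_right _ (by simp [he]))
        rw [pvPosF_cons_ne _ _ _ _ hwx]
      rw [e1, e3]
      simp [e2]

-- ===== VERDICT (by name: the statement is the Claim_ definition above) =====
theorem word_position_list_spec : Claim_equal_word_position_list := by
  intro my_str _
  show word_position_list my_str = word_position_list_alt my_str
  unfold word_position_list word_position_list_alt
  rw [pvFoldA _ 0 PySem.Dict.empty (by simp [PySem.Dict.empty])]
  simp only [PySem.Dict.empty, List.map_nil, List.nil_append,
    PySem.List.dedup, PySem.Set.ofList, PySem.Set.empty, pvSet_foldl_add _ []]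
  rfl
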